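-- pv_equiv track=rewrite | github.com/sahzudin/mockachu | mockachu/generators/custom_list_generator.py | __parse_custom_list
-- ===== SOURCE A (Python) =====
-- def __parse_custom_list(custom_list):
--     """Parse custom list from various formats (comma, semicolon, newline separated)"""
--     if not custom_list:
--         return []
--
--     # First split by newlines to handle multi-line input
--     lines = [line.strip() for line in custom_list.split('\n')]
--     lines = [line for line in lines if line]  # Remove empty lines
--
--     items = []
--
--     for line in lines:
--         # Handle mixed separators by replacing semicolons with commas first
--         if ';' in line:
--             line = line.replace(';', ',')
--
--         # Now split by comma
--         if ',' in line:
--             line_items = [item.strip() for item in line.split(',')]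
--         else:
--             line_items = [line.strip()]
--
--         items.extend([item for item in line_items if item])
--
--     # Fallback: if no items were parsed (single line input), try direct parsing
--     if not items:
--         # Handle mixed separators by replacing semicolons with commas first
--         normalized_list = custom_list.replace(';', ',')
--
--         if ',' in normalized_list:
--             items = [item.strip() for item in normalized_list.split(',')]
--         else:
--             items = [custom_list.strip()]
--
--         items = [item for item in items if item]
--
--     return items
-- ===== SOURCE B (Python) =====
-- def __parse_custom_list(custom_list):
--     """Parse custom list from various formats (comma, semicolon, newline separated)"""
--     if not custom_list:
--         return []
--     normalized = custom_list.replace(';', ',').replace('\n', ',')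
--     return [t.strip() for t in normalized.split(',') if t.strip()]
-- ===== Notes on version B (the rewrite author's own statement) =====
-- stated objective: simpler
-- what changed: Replaces A's per-line loop (split on newlines, per-line semicolon replacement and comma split, plus a dead single-line fallback branch) with one flat pass: normalize all three separators to a comma, split once, strip and filter.
import Mathlib
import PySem

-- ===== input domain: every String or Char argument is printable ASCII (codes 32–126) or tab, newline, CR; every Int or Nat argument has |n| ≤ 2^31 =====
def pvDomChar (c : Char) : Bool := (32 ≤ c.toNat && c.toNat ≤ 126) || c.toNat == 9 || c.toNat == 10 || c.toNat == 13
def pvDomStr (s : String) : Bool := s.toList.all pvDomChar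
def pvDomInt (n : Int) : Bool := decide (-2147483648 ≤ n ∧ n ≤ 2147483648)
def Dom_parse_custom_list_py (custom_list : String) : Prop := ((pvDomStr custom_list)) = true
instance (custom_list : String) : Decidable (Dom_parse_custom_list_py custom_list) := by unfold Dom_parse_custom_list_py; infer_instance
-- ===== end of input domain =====

-- B replaces A's per-line loop (newline split, per-line ';'->',' replace and comma split, plus a
-- dead single-line fallback branch) with one flat pass: normalize ';' and '\n' to ',', split once,
-- strip and filter — same return value, simpler decomposition.
-- ===== PORT A =====
-- literal transliteration of __parse_custom_list (split('\n') / replace / split(',') / strip ported via PySem.Str)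
def parse_custom_list_py (custom_list : String) : List String :=
  if custom_list = "" then []
  else
    let lines := ((PySem.Str.split? custom_list "\n").getD []).map PySem.Str.strip
    let lines := lines.filter (fun line => line ≠ "")
    let items := lines.foldl (fun acc line =>
      let line := if PySem.Str.isIn ";" line then PySem.Str.replace line ";" "," else line
      let lineItems :=
        if PySem.Str.isIn "," line then
          ((PySem.Str.split? line ",").getD []).map PySem.Str.strip
        else [PySem.Str.strip line]
      acc ++ lineItems.filter (fun item => item ≠ "")) []
    if items = [] then
      let normalized := PySem.Str.replace custom_list ";" ","
      let items' :=
        if PySem.Str.isIn "," normalized then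
          ((PySem.Str.split? normalized ",").getD []).map PySem.Str.strip
        else [PySem.Str.strip custom_list]
      items'.filter (fun item => item ≠ "")
    else items

-- ===== PORT B =====
-- literal transliteration of B: normalize ';' and '\n' to ',', split once, strip and filter
def parse_custom_list_py_alt (custom_list : String) : List String :=
  if custom_list = "" then []
  else
    let normalized := PySem.Str.replace (PySem.Str.replace custom_list ";" ",") "\n" ","
    (((PySem.Str.split? normalized ",").getD []).filter
        (fun t => PySem.Str.strip t ≠ "")).map PySem.Str.strip

-- ===== PRECONDITION & SPEC =====
def Spec_parse_custom_list_py (custom_list : String) (out : List String) : Prop := out = parse_custom_list_py_alt custom_list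
instance (custom_list : String) (out : List String) : Decidable (Spec_parse_custom_list_py custom_list out) := by unfold Spec_parse_custom_list_py; infer_instance

-- ===== CLAIM (what is proved, stated in full; the proofs are below) =====
def Claim_equal_parse_custom_list_py : Prop := ∀ (custom_list : String), Dom_parse_custom_list_py custom_list → Spec_parse_custom_list_py custom_list (parse_custom_list_py custom_list)

-- ===== LEMMAS AND PROOFS =====

def pvTok (p : Char → Bool) : List Char → List (List Char)
  | [] => [[]]
  | a :: t => if p a then [] :: pvTok p t else (pvTok p t).modifyHead (a :: ·)

def pvC (c : Char) : Bool := c == ',' || c == ';'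
def pvSep (c : Char) : Bool := c == ',' || c == ';' || c == '\n'

theorem pvTok_ne_nil (p : Char → Bool) (s : List Char) : pvTok p s ≠ [] := by
  induction s with
  | nil => simp [pvTok]
  | cons a t ih =>
    simp only [pvTok]
    split
    · simp
    · cases h : pvTok p t with
      | nil => exact absurd h ih
      | cons x r => simp [List.modifyHead]

theorem pvModifyHead_append {f : List Char → List Char} {l x : List (List Char)}
    (h : l ≠ []) : (l.modifyHead f) ++ x = (l ++ x).modifyHead f := by
  cases l with
  | nil => exact absurd rfl h
  | cons a t => simp [List.modifyHead]

theorem pvGo_split (c : Char) (l : List Char) : ∀ (fuel : Nat) (cur : List Char)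
    (acc : List (List Char)), l.length ≤ fuel →
    PySem.Chars.splitOn.go [c] fuel l cur acc
      = acc.reverse ++ (pvTok (· == c) l).modifyHead (cur.reverse ++ ·) := by
  induction l with
  | nil =>
    intro fuel cur acc _
    cases fuel <;> simp [PySem.Chars.splitOn.go, pvTok]
  | cons a t ih =>
    intro fuel cur acc hf
    cases fuel with
    | zero => simp at hf
    | succ f =>
      simp only [PySem.Chars.splitOn.go]
      by_cases hac : a = c
      · subst hac
        have hp : [a].isPrefixOf (a :: t) = true := by simp [List.isPrefixOf]
        rw [if_pos hp]
        have := ih f [] (cur.reverse :: acc) (by simp at hf; omega)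
        simp only [List.length_singleton, List.drop, List.drop_zero] at this ⊢
        rw [this]
        simp only [pvTok, beq_self_eq_true, if_true, List.modifyHead, List.reverse_cons,
          List.append_assoc, List.singleton_append, List.nil_append]
        cases pvTok (fun x => x == a) t <;> simp
      · have hp : [c].isPrefixOf (a :: t) = false := by
          simp [List.isPrefixOf]; exact fun h => hac h.symm
        rw [if_neg (by simp [hp])]
        rw [ih f (a :: cur) acc (by simpa using Nat.lt_succ_iff.mp (by simpa using hf))]
        simp only [pvTok, beq_iff_eq, if_neg hac]
        rw [List.modifyHead_modifyHead]
        congr 1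
        cases h : pvTok (· == c) t with
        | nil => exact absurd h (pvTok_ne_nil _ _)
        | cons x r => simp [List.modifyHead, Function.comp]

theorem pvSplitOn_singleton (c : Char) (s : List Char) :
    PySem.Chars.splitOn s [c] = pvTok (· == c) s := by
  rw [PySem.Chars.splitOn, pvGo_split c s (s.length + 1) [] [] (by omega)]
  cases h : pvTok (· == c) s with
  | nil => exact absurd h (pvTok_ne_nil _ _)
  | cons x r => simp [List.modifyHead]

theorem pvGo_replace (a b : Char) (l : List Char) : ∀ (fuel : Nat) (acc : List Char),
    l.length ≤ fuel →
    PySem.Chars.replace.go [a] [b] fuel l acc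
      = acc.reverse ++ l.map (fun x => if x == a then b else x) := by
  induction l with
  | nil => intro fuel acc _; cases fuel <;> simp [PySem.Chars.replace.go]
  | cons c t ih =>
    intro fuel acc hf
    cases fuel with
    | zero => simp at hf
    | succ f =>
      simp only [PySem.Chars.replace.go]
      by_cases hca : c = a
      · subst hca
        have hp : [c].isPrefixOf (c :: t) = true := by simp [List.isPrefixOf]
        rw [if_pos hp]
        have := ih f ([b].reverse ++ acc) (by simp at hf; omega)
        simp only [List.length_singleton, List.drop, List.drop_zero] at this ⊢
        rw [this]; simp
      · have hp : [a].isPrefixOf (c :: t) = false := by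
          simp [List.isPrefixOf]; exact fun h => hca h.symm
        rw [if_neg (by simp [hp])]
        rw [ih f (c :: acc) (by simp at hf; omega)]
        simp [hca]

theorem pvReplace_singleton (a b : Char) (s : List Char) :
    PySem.Chars.replace s [a] [b] = s.map (fun x => if x == a then b else x) := by
  rw [PySem.Chars.replace]
  rw [if_neg (by simp)]
  exact pvGo_replace a b s s.length [] (le_refl _)

theorem pvIsIn_singleton (c : Char) (s : List Char) :
    PySem.Chars.isIn [c] s = s.contains c := by
  by_cases h : c ∈ s
  · have hin : [c] <:+: s := by
      obtain ⟨l1, l2, rfl⟩ := List.append_of_mem h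
      exact ⟨l1, l2, by simp⟩
    rw [(PySem.Chars.isIn_iff_infix _ _).mpr hin]
    simp [h]
  · have hnin : ¬ [c] <:+: s := fun hin => h (hin.subset (by simp))
    rw [(PySem.Chars.isIn_eq_false_iff _ _).mpr hnin]
    simp [h]

theorem pvTok_congr {p q : Char → Bool} {s : List Char}
    (h : ∀ x ∈ s, p x = q x) : pvTok p s = pvTok q s := by
  induction s with
  | nil => rfl
  | cons a t ih =>
    simp only [pvTok, h a (by simp), ih (fun x hx => h x (by simp [hx]))]

theorem pvTokSingle (s : List Char) :
    pvTok (· == ',') (s.map (fun x => if x == ';' then ',' else x)) = pvTok pvC s := by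
  induction s with
  | nil => rfl
  | cons c t ih =>
    simp only [beq_iff_eq] at ih
    by_cases h1 : c = ';'
    · subst h1; simp [pvTok, pvC, ih]
    · by_cases h3 : c = ','
      · subst h3; simp [pvTok, pvC, ih]
      · simp [pvTok, pvC, h1, h3, ih]

theorem pvTokDouble (s : List Char) :
    pvTok (· == ',') ((s.map (fun x => if x == ';' then ',' else x)).map
      (fun x => if x == '\n' then ',' else x)) = pvTok pvSep s := by
  induction s with
  | nil => rfl
  | cons c t ih =>
    simp only [beq_iff_eq, List.map_map, Function.comp_def] at ih
    by_cases h1 : c = ';'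
    · subst h1; simp [pvTok, pvSep, List.map_map, Function.comp_def, ih]
    · by_cases h2 : c = '\n'
      · subst h2; simp [pvTok, pvSep, List.map_map, Function.comp_def, ih]
      · by_cases h3 : c = ','
        · subst h3; simp [pvTok, pvSep, List.map_map, Function.comp_def, ih]
        · simp [pvTok, pvSep, List.map_map, Function.comp_def, h1, h2, h3, ih]

theorem pvTok_no_sep {p : Char → Bool} {s : List Char}
    (h : ∀ x ∈ s, p x = false) : pvTok p s = [s] := by
  induction s with
  | nil => rfl
  | cons a t ih =>
    rw [pvTok, if_neg (by simp [h a (by simp)]),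
      ih (fun x hx => h x (by simp [hx]))]
    rfl

theorem pvTok_flatten (p q : Char → Bool) (s : List Char) :
    ((pvTok q s).map (pvTok p)).flatten = pvTok (fun x => p x || q x) s := by
  induction s with
  | nil => simp [pvTok]
  | cons a t ih =>
    obtain ⟨h, r, hhr⟩ := List.exists_cons_of_ne_nil (pvTok_ne_nil q t)
    by_cases hq : q a = true
    · have e0 : pvTok q (a :: t) = [] :: h :: r := by simp [pvTok, hq, hhr]
      rw [e0, List.map_cons, List.flatten_cons,
        show pvTok (fun x => p x || q x) (a :: t)
          = [] :: pvTok (fun x => p x || q x) t by simp [pvTok, hq],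
        ← ih, hhr]
      simp [pvTok]
    · have e1 : pvTok q (a :: t) = (a :: h) :: r := by
        simp [pvTok, hq, hhr, List.modifyHead]
      by_cases hp : p a = true
      · rw [e1, List.map_cons, List.flatten_cons,
          show pvTok p (a :: h) = [] :: pvTok p h by simp [pvTok, hp],
          show pvTok (fun x => p x || q x) (a :: t)
            = [] :: pvTok (fun x => p x || q x) t by simp [pvTok, hp],
          ← ih, hhr]
        simp
      · rw [e1, List.map_cons, List.flatten_cons,
          show pvTok p (a :: h) = (pvTok p h).modifyHead (a :: ·) by simp [pvTok, hp],
          pvModifyHead_append (pvTok_ne_nil p h),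
          show pvTok (fun x => p x || q x) (a :: t)
            = (pvTok (fun x => p x || q x) t).modifyHead (a :: ·) by simp [pvTok, hp, hq],
          ← ih, hhr]
        simp only [List.map_cons, List.flatten_cons]

theorem pvLstrip_ws_append {ws x : List Char}
    (h : ∀ c ∈ ws, PySem.Chars.isspace c = true) :
    PySem.Chars.lstrip (ws ++ x) = PySem.Chars.lstrip x := by
  simp only [PySem.Chars.lstrip, List.dropWhile_append,
    List.isEmpty_iff, List.dropWhile_eq_nil_iff.mpr h]
  simp

theorem pvRstrip_append_ws {ws x : List Char}
    (h : ∀ c ∈ ws, PySem.Chars.isspace c = true) :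
    PySem.Chars.rstrip (x ++ ws) = PySem.Chars.rstrip x := by
  have hnil : List.dropWhile PySem.Chars.isspace ws.reverse = [] :=
    List.dropWhile_eq_nil_iff.mpr (by simpa using h)
  simp [PySem.Chars.rstrip, List.reverse_append, List.dropWhile_append, hnil]

theorem pvRstrip_eq_nil {l : List Char} (h : ∀ c ∈ l, PySem.Chars.isspace c = true) :
    PySem.Chars.rstrip l = [] := by
  have hnil : List.dropWhile PySem.Chars.isspace l.reverse = [] :=
    List.dropWhile_eq_nil_iff.mpr (by simpa using h)
  simp [PySem.Chars.rstrip, hnil]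

theorem pvStrip_ws_append {ws x : List Char}
    (h : ∀ c ∈ ws, PySem.Chars.isspace c = true) :
    PySem.Chars.strip (ws ++ x) = PySem.Chars.strip x := by
  simp only [PySem.Chars.strip, pvLstrip_ws_append h]

theorem pvStrip_append_ws {ws x : List Char}
    (h : ∀ c ∈ ws, PySem.Chars.isspace c = true) :
    PySem.Chars.strip (x ++ ws) = PySem.Chars.strip x := by
  simp only [PySem.Chars.strip, PySem.Chars.lstrip, List.dropWhile_append]
  by_cases he : (List.dropWhile PySem.Chars.isspace x).isEmpty = true
  · rw [if_pos he, List.isEmpty_iff.mp he,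
      pvRstrip_eq_nil (fun c hc => h c ((List.dropWhile_suffix _).subset hc))]
    simp [PySem.Chars.rstrip]
  · rw [if_neg he]
    exact pvRstrip_append_ws h

theorem pvRev_decomp (m : List Char) :
    m = PySem.Chars.rstrip m ++ (m.reverse.takeWhile PySem.Chars.isspace).reverse := by
  conv_lhs => rw [← List.reverse_reverse m,
    ← List.takeWhile_append_dropWhile (p := PySem.Chars.isspace) (l := m.reverse)]
  rw [List.reverse_append]
  rfl

theorem pvStrip_eq_nil_iff {l : List Char} :
    PySem.Chars.strip l = [] ↔ ∀ c ∈ l, PySem.Chars.isspace c = true := by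
  constructor
  · intro h c hc
    by_contra hns
    have hdec : l = l.takeWhile PySem.Chars.isspace ++ PySem.Chars.lstrip l :=
      (List.takeWhile_append_dropWhile).symm
    have hc' : c ∈ PySem.Chars.lstrip l := by
      rcases List.mem_append.mp (hdec ▸ hc) with h1 | h1
      · exact absurd (List.mem_takeWhile_imp h1) hns
      · exact h1
    rw [pvRev_decomp (PySem.Chars.lstrip l)] at hc'
    rcases List.mem_append.mp hc' with h2 | h2
    · rw [show PySem.Chars.rstrip (PySem.Chars.lstrip l) = PySem.Chars.strip l from rfl,
        h] at h2
      simp at h2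
    · exact absurd (List.mem_takeWhile_imp (by simpa using h2)) hns
  · intro h
    have : PySem.Chars.lstrip l = [] := by
      simp [PySem.Chars.lstrip, List.dropWhile_eq_nil_iff.mpr h]
    simp [PySem.Chars.strip, this, PySem.Chars.rstrip]

theorem pvStrip_decomp (l : List Char) :
    ∃ w1 w2, (∀ c ∈ w1, PySem.Chars.isspace c = true)
      ∧ (∀ c ∈ w2, PySem.Chars.isspace c = true)
      ∧ l = w1 ++ PySem.Chars.strip l ++ w2 := by
  refine ⟨l.takeWhile PySem.Chars.isspace,
    ((PySem.Chars.lstrip l).reverse.takeWhile PySem.Chars.isspace).reverse,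
    fun c hc => List.mem_takeWhile_imp hc,
    fun c hc => List.mem_takeWhile_imp (by simpa using hc), ?_⟩
  conv_lhs => rw [← List.takeWhile_append_dropWhile (p := PySem.Chars.isspace) (l := l)]
  rw [List.append_assoc]
  congr 1
  exact pvRev_decomp (PySem.Chars.lstrip l)

def pvML (f : List Char → List Char) : List (List Char) → List (List Char)
  | [] => []
  | [x] => [f x]
  | x :: y :: t => x :: pvML f (y :: t)

theorem pvTok_ws_prefix {p : Char → Bool} {ws l : List Char}
    (h : ∀ c ∈ ws, p c = false) :
    pvTok p (ws ++ l) = (pvTok p l).modifyHead (ws ++ ·) := by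
  induction ws with
  | nil =>
    obtain ⟨x, r, hx⟩ := List.exists_cons_of_ne_nil (pvTok_ne_nil p l)
    rw [List.nil_append, hx]
    simp [List.modifyHead]
  | cons a ws ih =>
    have hpa : p a = false := h a (by simp)
    simp only [List.cons_append, pvTok]
    rw [if_neg (by simp [hpa]), ih (fun c hc => h c (by simp [hc])),
      List.modifyHead_modifyHead]
    obtain ⟨x, r, hx⟩ := List.exists_cons_of_ne_nil (pvTok_ne_nil p l)
    rw [hx]
    simp [List.modifyHead]

theorem pvTok_ws_suffix {p : Char → Bool} {ws l : List Char}
    (h : ∀ c ∈ ws, p c = false) :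
    pvTok p (l ++ ws) = pvML (· ++ ws) (pvTok p l) := by
  induction l with
  | nil => simp [pvTok_no_sep h, pvTok, pvML]
  | cons a t ih =>
    by_cases hp : p a = true
    · simp only [List.cons_append, pvTok, hp, if_true, ih]
      obtain ⟨x, r, hx⟩ := List.exists_cons_of_ne_nil (pvTok_ne_nil p t)
      rw [hx]
      cases r <;> simp [pvML]
    · simp only [List.cons_append, pvTok, hp, if_false, ih]
      obtain ⟨x, r, hx⟩ := List.exists_cons_of_ne_nil (pvTok_ne_nil p t)
      rw [hx]
      cases r <;> simp [pvML, List.modifyHead, List.append_assoc]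

def pvF (p : Char → Bool) (s : List Char) : List (List Char) :=
  ((pvTok p s).map PySem.Chars.strip).filter (fun t => !t.isEmpty)

theorem pvF_ws_prefix {p : Char → Bool} {ws l : List Char}
    (hws : ∀ c ∈ ws, PySem.Chars.isspace c = true)
    (hp : ∀ c ∈ ws, p c = false) :
    pvF p (ws ++ l) = pvF p l := by
  rw [pvF, pvTok_ws_prefix hp]
  obtain ⟨x, r, hx⟩ := List.exists_cons_of_ne_nil (pvTok_ne_nil p l)
  rw [hx]
  simp only [List.modifyHead, List.map_cons, pvStrip_ws_append hws, pvF, hx]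

theorem pvF_ws_suffix {p : Char → Bool} {ws l : List Char}
    (hws : ∀ c ∈ ws, PySem.Chars.isspace c = true)
    (hp : ∀ c ∈ ws, p c = false) :
    pvF p (l ++ ws) = pvF p l := by
  rw [pvF, pvTok_ws_suffix hp, pvF]
  congr 1
  generalize pvTok p l = L
  induction L with
  | nil => rfl
  | cons x r ihr =>
    cases r with
    | nil => simp [pvML, pvStrip_append_ws hws]
    | cons y q => simpa [pvML] using ihr

theorem pvF_strip {p : Char → Bool} (l : List Char)
    (hp : ∀ c, PySem.Chars.isspace c = true → p c = false) :
    pvF p (PySem.Chars.strip l) = pvF p l := by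
  obtain ⟨w1, w2, h1, h2, hdec⟩ := pvStrip_decomp l
  conv_rhs => rw [hdec]
  rw [List.append_assoc, pvF_ws_prefix h1 (fun c hc => hp c (h1 c hc)),
    pvF_ws_suffix h2 (fun c hc => hp c (h2 c hc))]

theorem pvF_eq_nil_iff {p : Char → Bool} {s : List Char} :
    pvF p s = [] ↔ ∀ a ∈ s, (PySem.Chars.isspace a || p a) = true := by
  induction s with
  | nil => simp [pvF, pvTok, PySem.Chars.strip, PySem.Chars.lstrip, PySem.Chars.rstrip]
  | cons a t ih =>
    obtain ⟨h, r, hx⟩ := List.exists_cons_of_ne_nil (pvTok_ne_nil p t)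
    by_cases hpa : p a = true
    · have e : pvF p (a :: t) = pvF p t := by
        simp [pvF, pvTok, hpa, PySem.Chars.strip, PySem.Chars.lstrip, PySem.Chars.rstrip]
      rw [e]
      simp only [List.mem_cons, forall_eq_or_imp, hpa, Bool.or_true, true_and]
      exact ih
    · by_cases hsa : PySem.Chars.isspace a = true
      · have e : pvF p (a :: t) = pvF p t := by
          rw [pvF, pvTok, if_neg (by simp [hpa]), hx]
          simp only [List.modifyHead, List.map_cons]
          rw [show (a :: h) = [a] ++ h from rfl,
            pvStrip_ws_append (by simpa using hsa)]
          simp [pvF, hx]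
        rw [e]
        simp only [List.mem_cons, forall_eq_or_imp, hsa, Bool.true_or, true_and]
        exact ih
      · have hne : PySem.Chars.strip (a :: h) ≠ [] := by
          intro hcontra
          exact hsa (pvStrip_eq_nil_iff.mp hcontra a (by simp))
        have e : pvF p (a :: t) = PySem.Chars.strip (a :: h)
            :: ((List.map PySem.Chars.strip r).filter (fun t => !t.isEmpty)) := by
          rw [pvF, pvTok, if_neg (by simp [hpa]), hx]
          simp only [List.modifyHead, List.map_cons, List.filter_cons]
          rw [if_pos (by simpa using hne)]
        rw [e]
        constructor
        · intro hcontra; simp at hcontra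
        · intro hall
          exact absurd (hall a (by simp)) (by simp [hsa, hpa])

theorem pvStripStr (l : List Char) :
    PySem.Str.strip (String.ofList l) = String.ofList (PySem.Chars.strip l) :=
  String.toList_inj.mp (by simp)

theorem pvNeEmpty (l : List Char) :
    (decide (String.ofList l ≠ "")) = !l.isEmpty := by
  rcases l with _ | ⟨c, t⟩
  · simp
  · simp [← String.toList_inj]

theorem pvFlatMap_filter {α β : Type} (q : α → Bool) (g : α → List β) (L : List α)
    (h : ∀ x ∈ L, q x = false → g x = []) :
    (L.filter q).flatMap g = L.flatMap g := by
  induction L with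
  | nil => rfl
  | cons x t ih =>
    rw [List.filter_cons]
    by_cases hq : q x = true
    · rw [if_pos (by simp [hq]), List.flatMap_cons, List.flatMap_cons,
        ih (fun y hy => h y (by simp [hy]))]
    · rw [if_neg (by simpa using hq), List.flatMap_cons,
        h x (by simp) (by simpa using hq),
        ih (fun y hy => h y (by simp [hy]))]
      rfl

theorem pvMerge (s : List Char) :
    (pvTok (· == '\n') s).flatMap (fun l => pvF pvC l) = pvF pvSep s := by
  have : (pvTok (· == '\n') s).flatMap (fun l => pvF pvC l)
      = (((pvTok (· == '\n') s).flatMap (fun l => pvTok pvC l)).map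
          PySem.Chars.strip).filter (fun t => !t.isEmpty) := by
    rw [List.map_flatMap, List.filter_flatMap]
    rfl
  rw [this, List.flatMap_def, pvTok_flatten, pvF,
    pvTok_congr (q := pvSep) (fun x _ => by simp [pvC, pvSep, Bool.or_assoc])]

theorem pvOutEq (L : List (List Char)) :
    ((L.map String.ofList).map PySem.Str.strip).filter (fun i => decide (i ≠ ""))
      = ((L.map PySem.Chars.strip).filter (fun t => !t.isEmpty)).map String.ofList := by
  induction L with
  | nil => rfl
  | cons x t ih =>
    simp only [List.map_cons, pvStripStr, List.filter_cons, pvNeEmpty, ih]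
    by_cases h : (PySem.Chars.strip x).isEmpty = true
    · simp [h]
    · simp [h]

theorem pvSplitChar (ln sep : String) (c : Char) (h : sep.toList = [c]) :
    (PySem.Str.split? ln sep).getD []
      = (pvTok (· == c) ln.toList).map String.ofList := by
  rw [PySem.Str.split?, h]
  rw [show PySem.Chars.split? ln.toList [c] = some (PySem.Chars.splitOn ln.toList [c]) from rfl]
  rw [Option.map_some, Option.getD_some, pvSplitOn_singleton]

theorem pvLineA (ln : String) :
    (let line := if PySem.Str.isIn ";" ln then PySem.Str.replace ln ";" "," else ln
     let lineItems := if PySem.Str.isIn "," line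
       then ((PySem.Str.split? line ",").getD []).map PySem.Str.strip
       else [PySem.Str.strip line]
     lineItems.filter (fun item => item ≠ ""))
    = (pvF pvC ln.toList).map String.ofList := by
  simp only []
  have hsemi : ((";" : String).toList) = [';'] := rfl
  have hline : (if PySem.Str.isIn ";" ln then PySem.Str.replace ln ";" "," else ln).toList
      = ln.toList.map (fun x => if x == ';' then ',' else x) := by
    by_cases h : PySem.Str.isIn ";" ln = true
    · rw [if_pos h, PySem.Str.toList_replace, hsemi,
        show (("," : String).toList) = [','] from rfl, pvReplace_singleton]
    · rw [if_neg h]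
      have : ';' ∉ ln.toList := by
        have := PySem.Str.isIn_eq ";" ln
        rw [hsemi] at this
        have h2 : PySem.Chars.isIn [';'] ln.toList = false := by
          rw [← this]; simpa using h
        rw [pvIsIn_singleton] at h2
        simpa using h2
      conv_lhs => rw [show ln.toList = ln.toList.map id from (List.map_id _).symm]
      exact List.map_congr_left (fun x hx => by
        have hxne : x ≠ ';' := fun he => this (he ▸ hx)
        simp [hxne])
  set line := if PySem.Str.isIn ";" ln then PySem.Str.replace ln ";" "," else ln with hlinedef
  have htok : pvTok (· == ',') line.toList = pvTok pvC ln.toList := by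
    rw [hline, pvTokSingle]
  by_cases hc : PySem.Str.isIn "," line = true
  · rw [if_pos hc, pvSplitChar _ "," ',' rfl, htok, pvOutEq]
    rfl
  · rw [if_neg hc]
    have hnoc : ',' ∉ line.toList := by
      have := PySem.Str.isIn_eq "," line
      rw [show (("," : String).toList) = [','] from rfl] at this
      have h2 : PySem.Chars.isIn [','] line.toList = false := by
        rw [← this]; simpa using hc
      rw [pvIsIn_singleton] at h2
      simpa using h2
    have hnosep : ∀ x ∈ ln.toList, pvC x = false := by
      intro x hx
      by_cases hb : pvC x = true
      · exfalso
        apply hnoc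
        rw [hline]
        have ht' : x = ',' ∨ x = ';' := by simpa [pvC] using hb
        exact List.mem_map.mpr ⟨x, hx, by rcases ht' with rfl | rfl <;> simp⟩
      · simpa using hb
    rw [pvF, pvTok_no_sep hnosep]
    have hlneq : line = String.ofList ln.toList := by
      rw [← String.toList_inj, hline, String.toList_ofList]
      have : ∀ x ∈ ln.toList, (if x == ';' then ',' else x) = x := by
        intro x hx
        have h5 := hnosep x hx
        rw [if_neg]
        intro hxe
        rw [(beq_iff_eq ..).mp hxe] at h5
        simp [pvC] at h5
      calc ln.toList.map _ = ln.toList.map id := List.map_congr_left (fun x hx => this x hx)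
        _ = ln.toList := List.map_id _
    rw [hlneq, pvStripStr]
    simp only [List.map_cons, List.map_nil, List.filter_cons, pvNeEmpty]
    by_cases hE : (PySem.Chars.strip ln.toList).isEmpty = true
    · simp [hE]
    · simp [hE]

theorem pvOutEq2 (L : List (List Char)) :
    ((L.map String.ofList).filter (fun t => decide (PySem.Str.strip t ≠ ""))).map PySem.Str.strip
      = ((L.map PySem.Chars.strip).filter (fun t => !t.isEmpty)).map String.ofList := by
  have h := pvOutEq L
  rw [List.filter_map] at h
  simp only [Function.comp_def] at h
  exact h

theorem pvSpaceNotC : ∀ c : Char, PySem.Chars.isspace c = true → pvC c = false := by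
  intro c hc
  by_cases hb : pvC c = true
  · exfalso
    rcases (show c = ',' ∨ c = ';' by simpa [pvC] using hb) with rfl | rfl <;> exact absurd hc (by decide)
  · simpa using hb

theorem pvBEq (str : String) :
    parse_custom_list_py_alt str = (pvF pvSep str.toList).map String.ofList := by
  by_cases h : str = ""
  · subst h; rfl
  · have e : parse_custom_list_py_alt str
        = if str = "" then [] else
          ((((PySem.Str.split? (PySem.Str.replace (PySem.Str.replace str ";" ",") "\n" ",")
            ",").getD []).filter (fun t => decide (PySem.Str.strip t ≠ ""))).map PySem.Str.strip) := rfl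
    rw [e, if_neg h]
    rw [pvSplitChar _ "," ',' rfl]
    have h1 : (PySem.Str.replace (PySem.Str.replace str ";" ",") "\n" ",").toList
        = (str.toList.map (fun x => if x == ';' then ',' else x)).map
            (fun x => if x == '\n' then ',' else x) := by
      rw [PySem.Str.toList_replace, PySem.Str.toList_replace]
      rw [show (("\n" : String).toList) = ['\n'] from rfl,
        show ((";" : String).toList) = [';'] from rfl,
        show (("," : String).toList) = [','] from rfl,
        pvReplace_singleton, pvReplace_singleton]
    rw [h1]
    rw [pvTokDouble, pvOutEq2, pvF]

def pvG (ln : String) : List String :=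
  let line := if PySem.Str.isIn ";" ln then PySem.Str.replace ln ";" "," else ln
  let lineItems := if PySem.Str.isIn "," line
    then ((PySem.Str.split? line ",").getD []).map PySem.Str.strip
    else [PySem.Str.strip line]
  lineItems.filter (fun item => item ≠ "")

theorem pvGEq (ln : String) : pvG ln = (pvF pvC ln.toList).map String.ofList :=
  pvLineA ln

theorem pvAEq (str : String) :
    parse_custom_list_py str = (pvF pvSep str.toList).map String.ofList := by
  by_cases h : str = ""
  · subst h; rfl
  · have e : parse_custom_list_py str
        = if str = "" then [] else
          (if ((((PySem.Str.split? str "\n").getD []).map PySem.Str.strip).filter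
                (fun line => decide (line ≠ ""))).foldl (fun acc line => acc ++ pvG line) [] = [] then
             (if PySem.Str.isIn "," (PySem.Str.replace str ";" ",") = true then
                ((PySem.Str.split? (PySem.Str.replace str ";" ",") ",").getD []).map
                  PySem.Str.strip
              else [PySem.Str.strip str]).filter (fun item => decide (item ≠ ""))
           else ((((PySem.Str.split? str "\n").getD []).map PySem.Str.strip).filter
                (fun line => decide (line ≠ ""))).foldl (fun acc line => acc ++ pvG line) []) := rfl
    rw [e, if_neg h]
    have hI : ((((PySem.Str.split? str "\n").getD []).map PySem.Str.strip).filter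
          (fun line => decide (line ≠ ""))).foldl (fun acc line => acc ++ pvG line) []
        = (pvF pvSep str.toList).map String.ofList := by
      rw [PySem.List.foldl_append_eq_flatMap, List.nil_append]
      rw [pvSplitChar str "\n" '\n' rfl, pvOutEq]
      rw [show pvG = (fun ln => (pvF pvC ln.toList).map String.ofList) from funext pvGEq]
      rw [List.flatMap_map]
      simp only [String.toList_ofList]
      rw [pvFlatMap_filter _ _ _ (fun m _ hm => by
        have hm' : m = [] := by simpa using hm
        rw [hm']
        rfl)]
      rw [List.flatMap_map]
      rw [show (fun l => (pvF pvC (PySem.Chars.strip l)).map String.ofList)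
          = (fun l => (pvF pvC l).map String.ofList) from
        funext (fun l => by rw [pvF_strip l pvSpaceNotC])]
      rw [← List.map_flatMap, pvMerge]
    rw [hI]
    by_cases hnil : (pvF pvSep str.toList).map String.ofList = []
    · rw [if_pos hnil, hnil]
      have hFnil : pvF pvSep str.toList = [] := by simpa using hnil
      have hall := pvF_eq_nil_iff.mp hFnil
      by_cases hin : PySem.Str.isIn "," (PySem.Str.replace str ";" ",") = true
      · rw [if_pos hin]
        have h2 : ((PySem.Str.split? (PySem.Str.replace str ";" ",") ",").getD [])
            = (pvTok pvC str.toList).map String.ofList := by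
          rw [pvSplitChar _ "," ',' rfl, PySem.Str.toList_replace,
            show ((";" : String).toList) = [';'] from rfl,
            show (("," : String).toList) = [','] from rfl,
            pvReplace_singleton, pvTokSingle]
        rw [h2, pvOutEq]
        rw [show ((pvTok pvC str.toList).map PySem.Chars.strip).filter (fun t => !t.isEmpty)
            = pvF pvC str.toList from rfl]
        rw [show pvF pvC str.toList = [] from pvF_eq_nil_iff.mpr (fun a ha => by
          have := hall a ha
          rcases (show PySem.Chars.isspace a = true ∨ pvSep a = true by simpa using this)
            with hs | hsep
          · simp [hs]
          · rcases (show (a = ',' ∨ a = ';') ∨ a = '\n' by simpa [pvSep] using hsep)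
              with (rfl | rfl) | rfl
            · decide
            · decide
            · decide)]
        rfl
      · rw [if_neg hin]
        have hnoc : ',' ∉ str.toList.map (fun x => if x == ';' then ',' else x) := by
          have hiq := PySem.Str.isIn_eq "," (PySem.Str.replace str ";" ",")
          rw [PySem.Str.toList_replace] at hiq
          rw [show (("," : String).toList) = [','] from rfl,
            show ((";" : String).toList) = [';'] from rfl,
            pvReplace_singleton] at hiq
          have h2 : PySem.Chars.isIn [',']
              (str.toList.map (fun x => if x == ';' then ',' else x)) = false := by
            rw [← hiq]; simpa using hin
          rw [pvIsIn_singleton] at h2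
          simpa using h2
        have hallsp : ∀ c ∈ str.toList, PySem.Chars.isspace c = true := by
          intro c hc
          rcases (show PySem.Chars.isspace c = true ∨ pvSep c = true by
            simpa using hall c hc) with hs | hsep
          · exact hs
          · rcases (show (c = ',' ∨ c = ';') ∨ c = '\n' by simpa [pvSep] using hsep)
              with (rfl | rfl) | rfl
            · exact absurd (List.mem_map.mpr ⟨',', hc, by simp⟩) hnoc
            · exact absurd (List.mem_map.mpr ⟨';', hc, by simp⟩) hnoc
            · decide
        have hstrip : PySem.Str.strip str = "" := by
          rw [← String.toList_inj, PySem.Str.toList_strip,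
            pvStrip_eq_nil_iff.mpr hallsp]
          simp
        rw [hstrip]
        simp
    · rw [if_neg hnil]

-- ===== VERDICT (by name: the statement is the Claim_ definition above) =====
theorem parse_custom_list_py_spec : Claim_equal_parse_custom_list_py := by
  intro custom_list _
  show parse_custom_list_py custom_list = parse_custom_list_py_alt custom_list
  rw [pvAEq, pvBEq]
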